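-- pv_equiv track=rewrite | github.com/taylorott/Advent_of_Code | src/Year_2024/Day19/Solution.py | check_pattern_recursive
-- ===== SOURCE A (Python) =====
-- def check_pattern_recursive(pattern,myset,mytable=None,current_index=0):
--     if mytable is None: mytable = dict()
--
--     if current_index in mytable: return mytable[current_index]
--
--     if current_index == len(pattern): return 1
--
--     mytable[current_index]  = 0
--
--     for item in myset:
--         if len(item)+current_index<=len(pattern) and pattern[current_index: (current_index+len(item))]==item:
--             mytable[current_index] += check_pattern_recursive(pattern,myset,mytable,current_index+len(item))
--
--     return mytable[current_index]
-- ===== SOURCE B (Python) =====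
-- def check_pattern_recursive(pattern, myset, mytable=None, current_index=0):
--     if mytable is None:
--         mytable = dict()
--     if current_index in mytable:
--         return mytable[current_index]
--     n = len(pattern)
--     if not 0 <= current_index <= n:
--         return 0
--     ways = [0] * (n + 1)
--     for i in range(n, current_index - 1, -1):
--         if i in mytable:
--             ways[i] = mytable[i]
--         elif i == n:
--             ways[i] = 1
--         else:
--             for item in myset:
--                 if i + len(item) <= n and pattern[i:i + len(item)] == item:
--                     ways[i] += ways[i + len(item)]
--     return ways[current_index]
-- ===== Notes on version B (the rewrite author's own statement) =====
-- stated objective: alternative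
-- what changed: Replaces A's top-down memoized recursion over a shared mutable dict by a bottom-up array DP: ways[n..0] is filled in one backward pass (honouring caller-supplied mytable entries as overrides) and ways[current_index] is returned; no recursion and no mutation of mytable. Pre_ excludes one unspecified corner: a negative current_index combined with a caller-memo key strictly between it and 0, where A's Python negative-index slicing can chain into that entry and return its value while B returns 0 for any negative start.
-- outside the precondition, e.g. on check_pattern_recursive('ab', ['a'], {-1: 5}, -2): A returns 5, B returns 0
import Mathlib
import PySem

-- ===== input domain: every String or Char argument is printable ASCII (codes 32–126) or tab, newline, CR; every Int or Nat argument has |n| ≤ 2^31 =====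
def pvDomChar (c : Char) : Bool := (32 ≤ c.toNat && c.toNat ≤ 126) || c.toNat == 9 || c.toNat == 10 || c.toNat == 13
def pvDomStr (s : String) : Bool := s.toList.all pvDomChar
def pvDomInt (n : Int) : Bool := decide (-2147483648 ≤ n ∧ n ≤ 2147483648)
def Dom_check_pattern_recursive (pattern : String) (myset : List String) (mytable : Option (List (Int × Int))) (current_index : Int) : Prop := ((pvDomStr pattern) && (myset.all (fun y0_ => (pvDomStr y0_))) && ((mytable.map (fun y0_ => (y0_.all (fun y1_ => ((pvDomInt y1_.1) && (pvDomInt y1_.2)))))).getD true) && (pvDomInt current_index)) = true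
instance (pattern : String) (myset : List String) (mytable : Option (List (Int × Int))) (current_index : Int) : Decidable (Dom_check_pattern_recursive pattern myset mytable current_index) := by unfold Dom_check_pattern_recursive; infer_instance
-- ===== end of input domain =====

-- B replaces A's top-down memoized recursion by a bottom-up array DP; equivalence is about the
-- RETURN value only: A mutates a caller-supplied mytable in place, B does not.

-- ===== PORT A =====
-- shared convention helper: the Python dict argument (None -> empty dict)
def cprTable (mytable : Option (List (Int × Int))) : PySem.Dict Int Int :=
  match mytable with
  | none => PySem.Dict.empty
  | some l => PySem.Dict.ofList l

-- A's recursion; fuel is only a totality guard (unreachable on any input: every recursive call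
-- either strictly increases the index or hits the memo entry at once); returns (value, table)
-- since A threads the mutated dict.
mutual
def cprAux (p : List Char) (s : List (List Char)) :
    Nat → PySem.Dict Int Int → Int → Int × PySem.Dict Int Int
  | 0, d, _ => (0, d)
  | fuel + 1, d, ci =>
    match d.get? ci with
    | some v => (v, d)
    | none =>
      if ci = (p.length : Int) then (1, d)
      else
        let d2 := s.foldl (cprIter p s fuel ci) (d.insert ci 0)
        (d2.getD ci 0, d2)
termination_by fuel _ _ => 2 * fuel + 1
decreasing_by omega

-- body of A's for-loop over myset
def cprIter (p : List Char) (s : List (List Char)) (fuel : Nat) (ci : Int)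
    (dd : PySem.Dict Int Int) (item : List Char) : PySem.Dict Int Int :=
  if (item.length : Int) + ci ≤ (p.length : Int) ∧
      PySem.List.slice p (some ci) (some (ci + (item.length : Int))) = item then
    -- mytable[current_index] += check(...): old value read before the call
    let old := dd.getD ci 0
    let res := cprAux p s fuel dd (ci + (item.length : Int))
    res.2.insert ci (old + res.1)
  else dd
termination_by 2 * fuel + 2
decreasing_by omega
end

def check_pattern_recursive (pattern : String) (myset : List String) (mytable : Option (List (Int × Int))) (current_index : Int) : Int :=
  let p := pattern.toList
  let fuel := (((p.length : Int) - min current_index 0).toNat) + 2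
  (cprAux p (myset.map String.toList) fuel (cprTable mytable) current_index).1

-- ===== PORT B =====
-- body of B's inner loop over myset: ways[i] += ways[i + len(item)] on a match
-- (0 ≤ i and i + len(item) ≤ n in every call, so List.set/getD are Python's in-range indexing)
def cprBInner (p : List Char) (i : Int) (ways : List Int) (item : List Char) : List Int :=
  if i + (item.length : Int) ≤ (p.length : Int) ∧
      PySem.List.slice p (some i) (some (i + (item.length : Int))) = item then
    ways.set i.toNat (ways.getD i.toNat 0 + ways.getD (i + (item.length : Int)).toNat 0)
  else ways

-- one iteration of B's outer loop: fill ways[i]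
def cprBStep (p : List Char) (s : List (List Char)) (t : PySem.Dict Int Int)
    (ways : List Int) (i : Int) : List Int :=
  match t.get? i with
  | some v => ways.set i.toNat v
  | none =>
    if i = (p.length : Int) then ways.set i.toNat 1
    else s.foldl (cprBInner p i) ways

def check_pattern_recursive_alt (pattern : String) (myset : List String) (mytable : Option (List (Int × Int))) (current_index : Int) : Int :=
  let t := cprTable mytable
  match t.get? current_index with
  | some v => v
  | none =>
    let p := pattern.toList
    let n : Int := p.length
    if 0 ≤ current_index ∧ current_index ≤ n then
      let ways := (PySem.List.pyRange n (current_index - 1) (-1)).foldl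
        (cprBStep p (myset.map String.toList) t) (List.replicate (n.toNat + 1) 0)
      ways.getD current_index.toNat 0
    else 0

-- ===== PRECONDITION & SPEC =====
-- Pre_ excludes only a corner outside the function's intended domain: a NEGATIVE current_index
-- (absent from the memo table) together with a caller-memo key strictly between it and 0 — there
-- A's Python negative-index slicing can walk a chain of negative positions into that table entry
-- and return its value, while B treats a negative start as having no tilings and returns 0;
-- neither value is specified for a negative start.
def Pre_check_pattern_recursive (pattern : String) (myset : List String) (mytable : Option (List (Int × Int))) (current_index : Int) : Prop :=
  ((cprTable mytable).get? current_index).isSome = true ∨ 0 ≤ current_index ∨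
    current_index < -(pattern.toList.length : Int) ∨
    ∀ kv ∈ (cprTable mytable).items, ¬ (current_index < kv.1 ∧ kv.1 < 0)
instance (pattern : String) (myset : List String) (mytable : Option (List (Int × Int))) (current_index : Int) : Decidable (Pre_check_pattern_recursive pattern myset mytable current_index) := by unfold Pre_check_pattern_recursive; infer_instance

def pvWitness_check_pattern_recursive : String × List String × (Option (List (Int × Int))) × Int :=
  ("aab", ["a", "ab", "b"], none, 0)

def Spec_check_pattern_recursive (pattern : String) (myset : List String) (mytable : Option (List (Int × Int))) (current_index : Int) (out : Int) : Prop := out = check_pattern_recursive_alt pattern myset mytable current_index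
instance (pattern : String) (myset : List String) (mytable : Option (List (Int × Int))) (current_index : Int) (out : Int) : Decidable (Spec_check_pattern_recursive pattern myset mytable current_index out) := by unfold Spec_check_pattern_recursive; infer_instance

-- ===== CLAIM (what is proved, stated in full; the proofs are below) =====
def Claim_equal_check_pattern_recursive : Prop := ∀ (pattern : String) (myset : List String) (mytable : Option (List (Int × Int))) (current_index : Int), Dom_check_pattern_recursive pattern myset mytable current_index → Pre_check_pattern_recursive pattern myset mytable current_index → Spec_check_pattern_recursive pattern myset mytable current_index (check_pattern_recursive pattern myset mytable current_index)

-- ===== LEMMAS AND PROOFS =====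

-- Reference value function: the tiling count with caller-table overrides; an empty item adds the
-- running partial sum to itself (A reads its own half-built memo entry there, B reads ways[i]
-- mid-accumulation — both double the accumulator).
mutual
def cprV (p : List Char) (s : List (List Char)) (t : PySem.Dict Int Int) (i : Int) : Int :=
  match t.get? i with
  | some v => v
  | none => if i = (p.length : Int) then 1 else cprVSum p s t i s 0
termination_by (((p.length : Int) - i).toNat, s.length + 1)
decreasing_by
  apply Prod.Lex.right; omega

def cprVSum (p : List Char) (s : List (List Char)) (t : PySem.Dict Int Int) (i : Int) :
    List (List Char) → Int → Int
  | [], acc => acc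
  | item :: rest, acc =>
    if h : (item.length : Int) + i ≤ (p.length : Int) ∧
        PySem.List.slice p (some i) (some (i + (item.length : Int))) = item then
      if hne : item = [] then cprVSum p s t i rest (acc + acc)
      else cprVSum p s t i rest (acc + cprV p s t (i + (item.length : Int)))
    else
      cprVSum p s t i rest acc
termination_by items acc => (((p.length : Int) - i).toNat, items.length)
decreasing_by
  · apply Prod.Lex.right; simp
  · apply Prod.Lex.left
    have h1 : 1 ≤ item.length := List.length_pos_iff.mpr hne
    have h2 := h.1
    omega
  · apply Prod.Lex.right; simp
  · apply Prod.Lex.right; simp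
end

-- below -len(p) a slice of length |item| ≥ 1 is always too short to equal item
theorem cprSlice_len_lt (p : List Char) (item : List Char) (i : Int)
    (hi : i < -(p.length : Int)) (hne : item ≠ [])
    (hle : (item.length : Int) + i ≤ (p.length : Int)) :
    PySem.List.slice p (some i) (some (i + (item.length : Int))) ≠ item := by
  intro he
  have hlen := congrArg List.length he
  rw [PySem.List.length_slice] at hlen
  have hL : 1 ≤ item.length := List.length_pos_iff.mpr hne
  have h0 : PySem.List.clampIdx p.length i = 0 := by
    have hk : i = -((((-i).toNat : Nat)) : Int) := by omega
    rw [hk, PySem.List.clampIdx_neg_natCast _ _ (by omega)]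
    omega
  have h1 : PySem.List.clampIdx p.length (i + (item.length : Int)) < item.length := by
    by_cases hpos : 0 ≤ i + (item.length : Int)
    · have hk : i + (item.length : Int) = (((i + (item.length : Int)).toNat : Nat) : Int) := by
        omega
      rw [hk, PySem.List.clampIdx_natCast]
      omega
    · have hk : i + (item.length : Int)
          = -((((-(i + (item.length : Int))).toNat : Nat)) : Int) := by omega
      rw [hk, PySem.List.clampIdx_neg_natCast _ _ (by omega)]
      omega
  omega

-- at -len(p) ≤ i < 0 a nonempty item can only match when i + len(item) is still negative
theorem cprSlice_neg_short (p : List Char) (item : List Char) (i : Int)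
    (hlo : -(p.length : Int) ≤ i) (hi : i < 0) (hne : item ≠ [])
    (hpos : 0 ≤ i + (item.length : Int)) :
    PySem.List.slice p (some i) (some (i + (item.length : Int))) ≠ item := by
  intro he
  have hlen := congrArg List.length he
  rw [PySem.List.length_slice] at hlen
  have hL : 1 ≤ item.length := List.length_pos_iff.mpr hne
  have h0 : PySem.List.clampIdx p.length i = ((p.length : Int) + i).toNat := by
    have hk : i = -((((-i).toNat : Nat)) : Int) := by omega
    rw [hk, PySem.List.clampIdx_neg_natCast _ _ (by omega)]
    omega
  have h1 : (PySem.List.clampIdx p.length (i + (item.length : Int)) : Int)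
      ≤ min (i + (item.length : Int)) (p.length : Int) := by
    have hk : i + (item.length : Int) = (((i + (item.length : Int)).toNat : Nat) : Int) := by
      omega
    rw [hk, PySem.List.clampIdx_natCast]
    omega
  omega

-- ===== A-side: the fueled memoized recursion computes cprV =====
theorem cprAux_spec (p : List Char) (s : List (List Char)) (t : PySem.Dict Int Int) :
    ∀ (fuel : Nat) (i : Int) (d : PySem.Dict Int Int),
      ((p.length : Int) - i).toNat < fuel →
      (∀ k v, t.get? k = some v → d.get? k = some v) →
      (∀ k v, i ≤ k → t.get? k = none → d.get? k = some v → v = cprV p s t k) →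
      (cprAux p s fuel d i).1 = cprV p s t i
      ∧ (∀ k v, t.get? k = some v → (cprAux p s fuel d i).2.get? k = some v)
      ∧ (∀ k v, i ≤ k → t.get? k = none → (cprAux p s fuel d i).2.get? k = some v → v = cprV p s t k)
      ∧ (∀ k, k < i → (cprAux p s fuel d i).2.get? k = d.get? k) := by
  intro fuel
  induction fuel with
  | zero => intro i d hf _ _; exact absurd hf (by omega)
  | succ fuel ih =>
    intro i d hf h1 h2
    cases hd : d.get? i with
    | some v =>
      have hv : v = cprV p s t i := by
        cases ht : t.get? i with
        | some w =>
          have hw := h1 i w ht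
          rw [hd] at hw
          rw [cprV, ht]
          exact Option.some.inj hw
        | none => exact h2 i v le_rfl ht hd
      simp only [cprAux, hd]
      exact ⟨hv, h1, h2, by simp⟩
    | none =>
      have ht0 : t.get? i = none := by
        cases ht : t.get? i with
        | some w =>
          have hw := h1 i w ht
          rw [hd] at hw
          cases hw
        | none => rfl
      by_cases hn : i = (p.length : Int)
      · simp only [cprAux, hd, if_pos hn]
        refine ⟨?_, h1, h2, by simp⟩
        rw [cprV, ht0, if_pos hn]
      · have hfold : ∀ (lst : List (List Char)),
            ∀ (dd : PySem.Dict Int Int) (acc : Int),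
            (∀ k v, t.get? k = some v → dd.get? k = some v) →
            (∀ k v, i + 1 ≤ k → t.get? k = none → dd.get? k = some v → v = cprV p s t k) →
            dd.get? i = some acc →
            (lst.foldl (cprIter p s fuel i) dd).get? i = some (cprVSum p s t i lst acc)
            ∧ (∀ k v, t.get? k = some v → (lst.foldl (cprIter p s fuel i) dd).get? k = some v)
            ∧ (∀ k v, i + 1 ≤ k → t.get? k = none →
                (lst.foldl (cprIter p s fuel i) dd).get? k = some v → v = cprV p s t k)
            ∧ (∀ k, k < i → (lst.foldl (cprIter p s fuel i) dd).get? k = dd.get? k) := by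
          intro lst
          induction lst with
          | nil =>
            intro dd acc c1 c2 hacc
            simp only [List.foldl_nil]
            refine ⟨?_, c1, c2, by simp⟩
            rw [cprVSum]
            exact hacc
          | cons item rest ihl =>
            intro dd acc c1 c2 hacc
            simp only [List.foldl_cons]
            by_cases hc : (item.length : Int) + i ≤ (p.length : Int) ∧
                PySem.List.slice p (some i) (some (i + (item.length : Int))) = item
            · by_cases hne : item = []
              · -- the empty item: the recursive call hits the half-built memo entry
                have hL0 : (item.length : Int) = 0 := by rw [hne]; rfl
                have hfuel1 : 1 ≤ fuel := by
                  have hin : i < (p.length : Int) := by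
                    rcases lt_or_gt_of_ne hn with h | h
                    · exact h
                    · exfalso; have := hc.1; omega
                  omega
                obtain ⟨f, rfl⟩ : ∃ f, fuel = f + 1 := ⟨fuel - 1, by omega⟩
                have hstep : cprIter p s (f + 1) i dd item = dd.insert i (acc + acc) := by
                  unfold cprIter
                  rw [if_pos hc]
                  have he : i + (item.length : Int) = i := by omega
                  rw [he]
                  simp only [cprAux, hacc]
                  have hgd : dd.getD i 0 = acc := by
                    rw [PySem.Dict.getD_eq_get?_getD, hacc]; rfl
                  rw [hgd]
                have c1' : ∀ k v, t.get? k = some v → (dd.insert i (acc + acc)).get? k = some v := by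
                  intro k v hkv
                  have hki : k ≠ i := by intro e; subst e; rw [ht0] at hkv; cases hkv
                  rw [PySem.Dict.get?_insert_of_ne _ _ hki]
                  exact c1 k v hkv
                have c2' : ∀ k v, i + 1 ≤ k → t.get? k = none →
                    (dd.insert i (acc + acc)).get? k = some v → v = cprV p s t k := by
                  intro k v hk htk hg
                  rw [PySem.Dict.get?_insert_of_ne _ _ (by omega : k ≠ i)] at hg
                  exact c2 k v hk htk hg
                obtain ⟨q1, q2, q3, q4⟩ := ihl (dd.insert i (acc + acc)) (acc + acc) c1' c2'
                  (by rw [PySem.Dict.get?_insert_self])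
                rw [cprVSum, dif_pos hc, dif_pos hne, hstep]
                refine ⟨q1, q2, q3, fun k hk => (q4 k hk).trans ?_⟩
                exact PySem.Dict.get?_insert_of_ne _ _ (by omega : k ≠ i)
              · have hL : 1 ≤ item.length := List.length_pos_iff.mpr hne
                have hstep : cprIter p s fuel i dd item
                    = (cprAux p s fuel dd (i + (item.length : Int))).2.insert i
                        (dd.getD i 0 + (cprAux p s fuel dd (i + (item.length : Int))).1) := by
                  unfold cprIter; rw [if_pos hc]
                obtain ⟨hrv, hr1, hr2, hrfr⟩ := ih (i + (item.length : Int)) dd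
                  (by have := hc.1; omega) c1
                  (fun k v hk htk hg => c2 k v (by omega) htk hg)
                have haccv : dd.getD i 0 = acc := by
                  rw [PySem.Dict.getD_eq_get?_getD, hacc]; rfl
                set dd' := (cprAux p s fuel dd (i + (item.length : Int))).2.insert i
                    (dd.getD i 0 + (cprAux p s fuel dd (i + (item.length : Int))).1) with hdd'
                have hget_i : dd'.get? i = some (acc + cprV p s t (i + (item.length : Int))) := by
                  rw [hdd', PySem.Dict.get?_insert_self, haccv, hrv]
                have c1' : ∀ k v, t.get? k = some v → dd'.get? k = some v := by
                  intro k v hkv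
                  have hki : k ≠ i := by
                    intro e; subst e; rw [ht0] at hkv; cases hkv
                  rw [hdd', PySem.Dict.get?_insert_of_ne _ _ hki]
                  exact hr1 k v hkv
                have c2' : ∀ k v, i + 1 ≤ k → t.get? k = none → dd'.get? k = some v →
                    v = cprV p s t k := by
                  intro k v hk htk hg
                  rw [hdd', PySem.Dict.get?_insert_of_ne _ _ (by omega : k ≠ i)] at hg
                  by_cases hkL : i + (item.length : Int) ≤ k
                  · exact hr2 k v hkL htk hg
                  · rw [hrfr k (by omega)] at hg
                    exact c2 k v hk htk hg
                have hfr' : ∀ k, k < i → dd'.get? k = dd.get? k := by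
                  intro k hk
                  rw [hdd', PySem.Dict.get?_insert_of_ne _ _ (by omega : k ≠ i)]
                  exact hrfr k (by omega)
                obtain ⟨q1, q2, q3, q4⟩ := ihl dd'
                  (acc + cprV p s t (i + (item.length : Int))) c1' c2' hget_i
                rw [cprVSum, dif_pos hc, dif_neg hne, hstep]
                exact ⟨q1, q2, q3, fun k hk => (q4 k hk).trans (hfr' k hk)⟩
            · have hstep : cprIter p s fuel i dd item = dd := by
                unfold cprIter; rw [if_neg hc]
              rw [cprVSum, dif_neg hc, hstep]
              exact ihl dd acc c1 c2 hacc
        have hd1c1 : ∀ k v, t.get? k = some v → (d.insert i 0).get? k = some v := by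
          intro k v hkv
          have hki : k ≠ i := by intro e; subst e; rw [ht0] at hkv; cases hkv
          rw [PySem.Dict.get?_insert_of_ne _ _ hki]
          exact h1 k v hkv
        have hd1c2 : ∀ k v, i + 1 ≤ k → t.get? k = none → (d.insert i 0).get? k = some v →
            v = cprV p s t k := by
          intro k v hk htk hg
          rw [PySem.Dict.get?_insert_of_ne _ _ (by omega : k ≠ i)] at hg
          exact h2 k v (by omega) htk hg
        obtain ⟨hFi, hF1, hF2, hFfr⟩ := hfold s (d.insert i 0) 0 hd1c1 hd1c2
          (by rw [PySem.Dict.get?_insert_self])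
        simp only [cprAux, hd, if_neg hn]
        refine ⟨?_, hF1, ?_, ?_⟩
        · rw [PySem.Dict.getD_eq_get?_getD, hFi, Option.getD_some, cprV, ht0, if_neg hn]
        · intro k v hk htk hg
          by_cases hki : k = i
          · subst hki
            rw [hFi] at hg
            rw [← Option.some.inj hg, cprV, htk, if_neg hn]
          · exact hF2 k v (by omega) htk hg
        · intro k hk
          rw [hFfr k hk, PySem.Dict.get?_insert_of_ne _ _ (by omega : k ≠ i)]

-- ===== A-side, negative region =====
-- current_index < -len(pattern): no item can match, the memo entry stays 0
theorem cprFold_low (p : List Char) (s : List (List Char)) (fuel : Nat) (ci : Int)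
    (hci : ci < -(p.length : Int)) :
    ∀ (lst : List (List Char)) (dd : PySem.Dict Int Int), dd.get? ci = some 0 →
      (lst.foldl (cprIter p s fuel ci) dd).get? ci = some 0 := by
  intro lst
  induction lst with
  | nil => intro dd h; exact h
  | cons item rest ihl =>
    intro dd h
    simp only [List.foldl_cons]
    by_cases hc : (item.length : Int) + ci ≤ (p.length : Int) ∧
        PySem.List.slice p (some ci) (some (ci + (item.length : Int))) = item
    · by_cases hne : item = []
      · have hL0 : (item.length : Int) = 0 := by rw [hne]; rfl
        have hstep : cprIter p s fuel ci dd item = dd.insert ci 0 := by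
          unfold cprIter
          rw [if_pos hc]
          have he : ci + (item.length : Int) = ci := by omega
          rw [he]
          have hgd : dd.getD ci 0 = 0 := by
            rw [PySem.Dict.getD_eq_get?_getD, h]; rfl
          cases fuel with
          | zero => simp [cprAux, hgd]
          | succ f => simp [cprAux, h, hgd]
        rw [hstep]
        exact ihl _ (by rw [PySem.Dict.get?_insert_self])
      · exact absurd hc.2 (cprSlice_len_lt p item ci hci hne hc.1)
    · have hstep : cprIter p s fuel ci dd item = dd := by
        unfold cprIter; rw [if_neg hc]
      rw [hstep]
      exact ihl dd h

theorem cpr_A_low (pattern : String) (myset : List String)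
    (mytable : Option (List (Int × Int))) (ci : Int)
    (hci : ci < -(pattern.toList.length : Int))
    (hnone : (cprTable mytable).get? ci = none) :
    check_pattern_recursive pattern myset mytable ci = 0 := by
  show (cprAux pattern.toList (myset.map String.toList)
    ((((pattern.toList.length : Int) - min ci 0).toNat) + 2) (cprTable mytable) ci).1 = 0
  obtain ⟨f, hfe⟩ : ∃ f, (((pattern.toList.length : Int) - min ci 0).toNat) + 2 = f + 1 :=
    ⟨_, rfl⟩
  rw [hfe]
  have hn : ¬ ci = (pattern.toList.length : Int) := by
    have : (0 : Int) ≤ (pattern.toList.length : Int) := Int.natCast_nonneg _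
    omega
  simp only [cprAux, hnone, if_neg hn]
  rw [PySem.Dict.getD_eq_get?_getD,
    cprFold_low pattern.toList (myset.map String.toList) f ci hci _ _
      (by rw [PySem.Dict.get?_insert_self])]
  rfl

-- -len(p) ≤ current_index < 0 with no caller-memo key in (current_index, 0): every memo entry
-- A creates in the negative region is 0, so A returns 0
theorem cprNegAux (p : List Char) (s : List (List Char)) (t : PySem.Dict Int Int) (ci : Int)
    (hci : ci < 0) (htci : t.get? ci = none)
    (htneg : ∀ k, ci < k → k < 0 → t.get? k = none) :
    ∀ (fuel : Nat) (j : Int) (d : PySem.Dict Int Int), ci ≤ j → j < 0 →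
      (∀ k v, d.get? k = some v → t.get? k = some v ∨ v = 0) →
      (cprAux p s fuel d j).1 = 0
      ∧ (∀ k v, (cprAux p s fuel d j).2.get? k = some v → t.get? k = some v ∨ v = 0) := by
  intro fuel
  induction fuel with
  | zero =>
    intro j d _ _ hP
    constructor
    · simp [cprAux]
    · intro k v hkv
      exact hP k v (by simpa [cprAux] using hkv)
  | succ fuel ih =>
    intro j d hj hjneg hP
    cases hd : d.get? j with
    | some v =>
      have hv : v = 0 := by
        rcases hP j v hd with h | h
        · rcases lt_or_eq_of_le hj with h' | h'
          · rw [htneg j h' hjneg] at h; cases h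
          · rw [← h', htci] at h; cases h
        · exact h
      simp only [cprAux, hd]
      exact ⟨hv, hP⟩
    | none =>
      have hn : ¬ j = (p.length : Int) := by
        have : (0 : Int) ≤ (p.length : Int) := Int.natCast_nonneg _
        omega
      have hfold : ∀ (lst : List (List Char)) (dd : PySem.Dict Int Int),
          (∀ k v, dd.get? k = some v → t.get? k = some v ∨ v = 0) →
          dd.get? j = some 0 →
          (lst.foldl (cprIter p s fuel j) dd).get? j = some 0
          ∧ (∀ k v, (lst.foldl (cprIter p s fuel j) dd).get? k = some v →
              t.get? k = some v ∨ v = 0) := by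
        intro lst
        induction lst with
        | nil => intro dd hPd hj0; exact ⟨hj0, hPd⟩
        | cons item rest ihl =>
          intro dd hPd hj0
          simp only [List.foldl_cons]
          by_cases hc : (item.length : Int) + j ≤ (p.length : Int) ∧
              PySem.List.slice p (some j) (some (j + (item.length : Int))) = item
          · have hgd : dd.getD j 0 = 0 := by
              rw [PySem.Dict.getD_eq_get?_getD, hj0]; rfl
            by_cases hne : item = []
            · have hL0 : (item.length : Int) = 0 := by rw [hne]; rfl
              have hstep : cprIter p s fuel j dd item = dd.insert j 0 := by
                unfold cprIter
                rw [if_pos hc]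
                have he : j + (item.length : Int) = j := by omega
                rw [he]
                cases fuel with
                | zero => simp [cprAux, hgd]
                | succ f => simp [cprAux, hj0, hgd]
              rw [hstep]
              refine ihl _ ?_ (by rw [PySem.Dict.get?_insert_self])
              intro k v hkv
              by_cases hkj : k = j
              · subst hkj
                rw [PySem.Dict.get?_insert_self] at hkv
                exact Or.inr (Option.some.inj hkv).symm
              · rw [PySem.Dict.get?_insert_of_ne _ _ hkj] at hkv
                exact hPd k v hkv
            · -- a nonempty match at a negative index must land at a NEGATIVE index
              have hL : 1 ≤ item.length := List.length_pos_iff.mpr hne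
              have hjL : j + (item.length : Int) < 0 := by
                by_contra hge
                push_neg at hge
                by_cases hlo : -(p.length : Int) ≤ j
                · exact cprSlice_neg_short p item j hlo hjneg hne hge hc.2
                · push_neg at hlo
                  exact cprSlice_len_lt p item j hlo hne (by have := hc.1; omega) hc.2
              have hstep : cprIter p s fuel j dd item
                  = (cprAux p s fuel dd (j + (item.length : Int))).2.insert j
                      (dd.getD j 0 + (cprAux p s fuel dd (j + (item.length : Int))).1) := by
                unfold cprIter; rw [if_pos hc]
              obtain ⟨hr0, hrP⟩ := ih (j + (item.length : Int)) dd (by omega) hjL hPd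
              rw [hstep, hgd, hr0]
              refine ihl _ ?_ (by rw [PySem.Dict.get?_insert_self]; norm_num)
              intro k v hkv
              by_cases hkj : k = j
              · subst hkj
                rw [PySem.Dict.get?_insert_self] at hkv
                exact Or.inr (Option.some.inj hkv).symm
              · rw [PySem.Dict.get?_insert_of_ne _ _ hkj] at hkv
                exact hrP k v hkv
          · have hstep : cprIter p s fuel j dd item = dd := by
              unfold cprIter; rw [if_neg hc]
            rw [hstep]
            exact ihl dd hPd hj0
      simp only [cprAux, hd, if_neg hn]
      have hP' : ∀ k v, (d.insert j 0).get? k = some v → t.get? k = some v ∨ v = 0 := by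
        intro k v hkv
        by_cases hkj : k = j
        · subst hkj
          rw [PySem.Dict.get?_insert_self] at hkv
          exact Or.inr (Option.some.inj hkv).symm
        · rw [PySem.Dict.get?_insert_of_ne _ _ hkj] at hkv
          exact hP k v hkv
      obtain ⟨hF0, hFP⟩ := hfold s (d.insert j 0) hP' (by rw [PySem.Dict.get?_insert_self])
      refine ⟨?_, hFP⟩
      rw [PySem.Dict.getD_eq_get?_getD, hF0]
      rfl

-- ===== B-side: the array fill computes cprV at every table position =====
theorem cprBInner_fold (p : List Char) (s : List (List Char)) (t : PySem.Dict Int Int)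
    (i : Int) (hi0 : 0 ≤ i) (hin : i < (p.length : Int)) :
    ∀ (lst : List (List Char)) (ways : List Int) (acc : Int),
      ways.length = p.length + 1 →
      ways.getD i.toNat 0 = acc →
      (∀ j : Nat, i.toNat < j → j ≤ p.length → ways.getD j 0 = cprV p s t (j : Int)) →
      (lst.foldl (cprBInner p i) ways).length = p.length + 1
      ∧ (lst.foldl (cprBInner p i) ways).getD i.toNat 0 = cprVSum p s t i lst acc
      ∧ (∀ j : Nat, j ≠ i.toNat → (lst.foldl (cprBInner p i) ways).getD j 0 = ways.getD j 0) := by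
  intro lst
  induction lst with
  | nil =>
    intro ways acc hlen hacc hhigh
    refine ⟨hlen, ?_, fun _ _ => rfl⟩
    rw [cprVSum]; exact hacc
  | cons item rest ihl =>
    intro ways acc hlen hacc hhigh
    simp only [List.foldl_cons]
    have hmemlt : i.toNat < ways.length := by omega
    by_cases hc : i + (item.length : Int) ≤ (p.length : Int) ∧
        PySem.List.slice p (some i) (some (i + (item.length : Int))) = item
    · have hc' : (item.length : Int) + i ≤ (p.length : Int) ∧
          PySem.List.slice p (some i) (some (i + (item.length : Int))) = item :=
        ⟨by have := hc.1; omega, hc.2⟩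
      have hstep : cprBInner p i ways item
          = ways.set i.toNat (acc + ways.getD (i + (item.length : Int)).toNat 0) := by
        unfold cprBInner
        rw [if_pos hc, hacc]
      by_cases hne : item = []
      · have hL0 : (item.length : Int) = 0 := by rw [hne]; rfl
        have hidx : (i + (item.length : Int)).toNat = i.toNat := by omega
        rw [hstep, hidx, hacc]
        have hlen' : (ways.set i.toNat (acc + acc)).length = p.length + 1 := by
          rw [List.length_set]; exact hlen
        have hacc' : (ways.set i.toNat (acc + acc)).getD i.toNat 0 = acc + acc := by
          rw [List.getD_eq_getElem?_getD, List.getElem?_set_self (by omega)]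
          rfl
        have hhigh' : ∀ j : Nat, i.toNat < j → j ≤ p.length →
            (ways.set i.toNat (acc + acc)).getD j 0 = cprV p s t (j : Int) := by
          intro j hj1 hj2
          rw [List.getD_eq_getElem?_getD, List.getElem?_set_ne (by omega),
            ← List.getD_eq_getElem?_getD]
          exact hhigh j hj1 hj2
        obtain ⟨q1, q2, q3⟩ := ihl _ (acc + acc) hlen' hacc' hhigh'
        refine ⟨q1, ?_, ?_⟩
        · rw [q2, cprVSum, dif_pos hc', dif_pos hne]
        · intro j hj
          rw [q3 j hj, List.getD_eq_getElem?_getD, List.getElem?_set_ne (by omega),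
            ← List.getD_eq_getElem?_getD]
      · have hL : 1 ≤ item.length := List.length_pos_iff.mpr hne
        have hidx0 : (0 : Int) ≤ i + (item.length : Int) := by omega
        have hval : ways.getD (i + (item.length : Int)).toNat 0
            = cprV p s t (i + (item.length : Int)) := by
          have h1 : i.toNat < (i + (item.length : Int)).toNat := by omega
          have h2 : (i + (item.length : Int)).toNat ≤ p.length := by
            have := hc.1; omega
          have h3 : (((i + (item.length : Int)).toNat : Nat) : Int)
              = i + (item.length : Int) := by omega
          rw [hhigh _ h1 h2, h3]
        rw [hstep, hval]
        have hlen' : (ways.set i.toNat (acc + cprV p s t (i + (item.length : Int)))).length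
            = p.length + 1 := by
          rw [List.length_set]; exact hlen
        have hacc' : (ways.set i.toNat (acc + cprV p s t (i + (item.length : Int)))).getD
            i.toNat 0 = acc + cprV p s t (i + (item.length : Int)) := by
          rw [List.getD_eq_getElem?_getD, List.getElem?_set_self (by omega)]
          rfl
        have hhigh' : ∀ j : Nat, i.toNat < j → j ≤ p.length →
            (ways.set i.toNat (acc + cprV p s t (i + (item.length : Int)))).getD j 0
              = cprV p s t (j : Int) := by
          intro j hj1 hj2
          rw [List.getD_eq_getElem?_getD, List.getElem?_set_ne (by omega),
            ← List.getD_eq_getElem?_getD]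
          exact hhigh j hj1 hj2
        obtain ⟨q1, q2, q3⟩ := ihl _ _ hlen' hacc' hhigh'
        refine ⟨q1, ?_, ?_⟩
        · rw [q2, cprVSum, dif_pos hc', dif_neg hne]
        · intro j hj
          rw [q3 j hj, List.getD_eq_getElem?_getD, List.getElem?_set_ne (by omega),
            ← List.getD_eq_getElem?_getD]
    · have hstep : cprBInner p i ways item = ways := by
        unfold cprBInner; rw [if_neg hc]
      have hc2 : ¬ ((item.length : Int) + i ≤ (p.length : Int) ∧
          PySem.List.slice p (some i) (some (i + (item.length : Int))) = item) := by
        rintro ⟨h1, h2⟩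
        exact hc ⟨by omega, h2⟩
      rw [hstep]
      obtain ⟨q1, q2, q3⟩ := ihl ways acc hlen hacc hhigh
      exact ⟨q1, by rw [q2, cprVSum, dif_neg hc2], q3⟩

theorem cprBStep_spec (p : List Char) (s : List (List Char)) (t : PySem.Dict Int Int)
    (ways : List Int) (a : Int) (ha0 : 0 ≤ a) (han : a ≤ (p.length : Int))
    (hlen : ways.length = p.length + 1)
    (hhigh : ∀ j : Nat, a < (j : Int) → j ≤ p.length → ways.getD j 0 = cprV p s t (j : Int))
    (hzero : ways.getD a.toNat 0 = 0) :
    (cprBStep p s t ways a).length = p.length + 1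
    ∧ ((cprBStep p s t ways a).getD a.toNat 0 = cprV p s t a)
    ∧ (∀ j : Nat, j ≠ a.toNat → (cprBStep p s t ways a).getD j 0 = ways.getD j 0) := by
  have hmemlt : a.toNat < ways.length := by omega
  unfold cprBStep
  cases ht : t.get? a with
  | some v =>
    refine ⟨by rw [List.length_set]; exact hlen, ?_, ?_⟩
    · rw [List.getD_eq_getElem?_getD, List.getElem?_set_self (by omega)]
      rw [cprV, ht]
      rfl
    · intro j hj
      rw [List.getD_eq_getElem?_getD, List.getElem?_set_ne (by omega),
        ← List.getD_eq_getElem?_getD]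
  | none =>
    by_cases hn : a = (p.length : Int)
    · rw [if_pos hn]
      refine ⟨by rw [List.length_set]; exact hlen, ?_, ?_⟩
      · rw [List.getD_eq_getElem?_getD, List.getElem?_set_self (by omega)]
        rw [cprV, ht, if_pos hn]
        rfl
      · intro j hj
        rw [List.getD_eq_getElem?_getD, List.getElem?_set_ne (by omega),
          ← List.getD_eq_getElem?_getD]
    · rw [if_neg hn]
      have hin : a < (p.length : Int) := by omega
      have hhigh' : ∀ j : Nat, a.toNat < j → j ≤ p.length →
          ways.getD j 0 = cprV p s t (j : Int) := by
        intro j hj1 hj2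
        exact hhigh j (by omega) hj2
      obtain ⟨q1, q2, q3⟩ := cprBInner_fold p s t a ha0 hin s ways 0 hlen hzero hhigh'
      refine ⟨q1, ?_, q3⟩
      rw [q2, cprV, ht, if_neg hn]

theorem cprBFold (p : List Char) (s : List (List Char)) (t : PySem.Dict Int Int)
    (lo : Int) (hlo : 0 ≤ lo) :
    ∀ (N : Nat) (a : Int) (ways : List Int),
      (a - lo + 1).toNat ≤ N → a ≤ (p.length : Int) →
      ways.length = p.length + 1 →
      (∀ j : Nat, a < (j : Int) → j ≤ p.length → ways.getD j 0 = cprV p s t (j : Int)) →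
      (∀ j : Nat, (j : Int) ≤ a → ways.getD j 0 = 0) →
      ∀ j : Nat, lo ≤ (j : Int) → j ≤ p.length →
        ((PySem.List.pyRange a (lo - 1) (-1)).foldl (cprBStep p s t) ways).getD j 0
          = cprV p s t (j : Int) := by
  intro N
  induction N with
  | zero =>
    intro a ways hN ha hlen hhigh _ j hjlo hj
    rw [PySem.List.pyRange_neg_one_eq_nil (by omega : a ≤ lo - 1)]
    exact hhigh j (by omega) hj
  | succ N ihN =>
    intro a ways hN ha hlen hhigh hzero j hjlo hj
    by_cases hstop : a < lo
    · rw [PySem.List.pyRange_neg_one_eq_nil (by omega : a ≤ lo - 1)]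
      exact hhigh j (by omega) hj
    · push_neg at hstop
      rw [PySem.List.pyRange_neg_one_cons (by omega : lo - 1 < a)]
      simp only [List.foldl_cons]
      obtain ⟨q1, q2, q3⟩ := cprBStep_spec p s t ways a (by omega) ha hlen hhigh
        (hzero a.toNat (by omega))
      refine ihN (a - 1) _ (by omega) (by omega) q1 ?_ ?_ j hjlo hj
      · intro j' hj1 hj2
        by_cases hj' : j' = a.toNat
        · subst hj'
          have : ((a.toNat : Nat) : Int) = a := by omega
          rw [q2, this]
        · rw [q3 j' hj']
          exact hhigh j' (by omega) hj2
      · intro j' hj'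
        rw [q3 j' (by omega)]
        exact hzero j' (by omega)

-- B's return value for an in-range index absent from the table
theorem cpr_B_main (pattern : String) (myset : List String)
    (mytable : Option (List (Int × Int))) (ci : Int)
    (h0 : 0 ≤ ci) (hn : ci ≤ (pattern.toList.length : Int))
    (hnone : (cprTable mytable).get? ci = none) :
    check_pattern_recursive_alt pattern myset mytable ci
      = cprV pattern.toList (myset.map String.toList) (cprTable mytable) ci := by
  unfold check_pattern_recursive_alt
  simp only [hnone]
  rw [if_pos ⟨h0, hn⟩]
  show ((PySem.List.pyRange (pattern.toList.length : Int) (ci - 1) (-1)).foldl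
      (cprBStep pattern.toList (myset.map String.toList) (cprTable mytable))
      (List.replicate ((pattern.toList.length : Int).toNat + 1) 0)).getD ci.toNat 0
    = cprV pattern.toList (myset.map String.toList) (cprTable mytable) ci
  have hrepl : ∀ j : Nat, (List.replicate (pattern.toList.length + 1) (0 : Int)).getD j 0 = 0 := by
    intro j
    rw [List.getD_eq_getElem?_getD]
    rcases lt_or_ge j (pattern.toList.length + 1) with h | h
    · rw [List.getElem?_replicate_of_lt h]; rfl
    · rw [List.getElem?_eq_none (by simpa using h)]; rfl
  have hmain := cprBFold pattern.toList (myset.map String.toList) (cprTable mytable)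
    ci h0
    ((pattern.toList.length : Int) + 1).toNat (pattern.toList.length : Int)
    (List.replicate ((pattern.toList.length : Int).toNat + 1) 0)
    (by omega) (le_refl _)
    (by rw [List.length_replicate]; omega)
    (fun j hj1 hj2 => absurd hj1 (by omega))
    (fun j _ => by
      have he : (pattern.toList.length : Int).toNat = pattern.toList.length := by omega
      rw [he]; exact hrepl j)
    ci.toNat (by omega) (by omega)
  have he2 : ((ci.toNat : Nat) : Int) = ci := by omega
  rw [he2] at hmain
  exact hmain

-- shortcut lemmas for the remaining cases
theorem cpr_A_table (pattern : String) (myset : List String)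
    (mytable : Option (List (Int × Int))) (ci : Int) (v : Int)
    (hv : (cprTable mytable).get? ci = some v) :
    check_pattern_recursive pattern myset mytable ci = v := by
  show (cprAux pattern.toList (myset.map String.toList)
    ((((pattern.toList.length : Int) - min ci 0).toNat) + 2) (cprTable mytable) ci).1 = v
  obtain ⟨f, hfe⟩ : ∃ f, (((pattern.toList.length : Int) - min ci 0).toNat) + 2 = f + 1 :=
    ⟨_, rfl⟩
  rw [hfe]
  simp [cprAux, hv]

theorem cpr_B_table (pattern : String) (myset : List String)
    (mytable : Option (List (Int × Int))) (ci : Int) (v : Int)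
    (hv : (cprTable mytable).get? ci = some v) :
    check_pattern_recursive_alt pattern myset mytable ci = v := by
  unfold check_pattern_recursive_alt
  simp [hv]

theorem cpr_A_gt (pattern : String) (myset : List String)
    (mytable : Option (List (Int × Int))) (ci : Int)
    (hgt : (pattern.toList.length : Int) < ci)
    (hnone : (cprTable mytable).get? ci = none) :
    check_pattern_recursive pattern myset mytable ci = 0 := by
  show (cprAux pattern.toList (myset.map String.toList)
    ((((pattern.toList.length : Int) - min ci 0).toNat) + 2) (cprTable mytable) ci).1 = 0
  obtain ⟨f, hfe⟩ : ∃ f, (((pattern.toList.length : Int) - min ci 0).toNat) + 2 = f + 1 :=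
    ⟨_, rfl⟩
  rw [hfe]
  have hiter : ∀ (lst : List (List Char)) (dd : PySem.Dict Int Int),
      lst.foldl (cprIter pattern.toList (myset.map String.toList) f ci) dd = dd := by
    intro lst
    induction lst with
    | nil => intro dd; rfl
    | cons item rest ih =>
      intro dd
      simp only [List.foldl_cons]
      have hstep : cprIter pattern.toList (myset.map String.toList) f ci dd item = dd := by
        unfold cprIter
        rw [if_neg]
        rintro ⟨h1, _⟩
        have h0 : (0 : Int) ≤ (item.length : Int) := Int.natCast_nonneg _
        omega
      rw [hstep]
      exact ih dd
  simp only [cprAux, hnone, if_neg (by omega : ¬ ci = (pattern.toList.length : Int))]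
  rw [hiter]
  rw [PySem.Dict.getD_eq_get?_getD, PySem.Dict.get?_insert_self, Option.getD_some]

theorem cpr_B_out (pattern : String) (myset : List String)
    (mytable : Option (List (Int × Int))) (ci : Int)
    (hout : ¬ (0 ≤ ci ∧ ci ≤ (pattern.toList.length : Int)))
    (hnone : (cprTable mytable).get? ci = none) :
    check_pattern_recursive_alt pattern myset mytable ci = 0 := by
  unfold check_pattern_recursive_alt
  simp only [hnone]
  rw [if_neg hout]

-- ===== VERDICT (by name: the statement is the Claim_ definition above) =====
theorem check_pattern_recursive_spec : Claim_equal_check_pattern_recursive := by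
  intro pattern myset mytable ci _ hpre
  unfold Spec_check_pattern_recursive
  cases hv : (cprTable mytable).get? ci with
  | some v =>
    rw [cpr_A_table pattern myset mytable ci v hv, cpr_B_table pattern myset mytable ci v hv]
  | none =>
    by_cases h0 : 0 ≤ ci
    · by_cases hn : ci ≤ (pattern.toList.length : Int)
      · rw [cpr_B_main pattern myset mytable ci h0 hn hv]
        unfold check_pattern_recursive
        exact (cprAux_spec pattern.toList (myset.map String.toList) (cprTable mytable)
          _ ci (cprTable mytable) (by omega) (fun _ _ h => h)
          (fun k v _ hno hso => by rw [hno] at hso; cases hso)).1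
      · rw [cpr_A_gt pattern myset mytable ci (by omega) hv,
          cpr_B_out pattern myset mytable ci (by omega) hv]
    · push_neg at h0
      rw [cpr_B_out pattern myset mytable ci (by omega) hv]
      by_cases hlow : ci < -(pattern.toList.length : Int)
      · exact cpr_A_low pattern myset mytable ci hlow hv
      · rcases hpre with h | h | h | h
        · rw [hv] at h; cases h
        · omega
        · omega
        · have htneg : ∀ k, ci < k → k < 0 → (cprTable mytable).get? k = none := by
            intro k hk1 hk2
            cases hg : (cprTable mytable).get? k with
            | none => rfl
            | some w =>
              exact absurd ⟨hk1, hk2⟩ (h (k, w) (PySem.Dict.mem_items_of_get?_eq_some _ hg))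
          unfold check_pattern_recursive
          exact (cprNegAux pattern.toList (myset.map String.toList) (cprTable mytable) ci
            h0 hv htneg _ ci (cprTable mytable) le_rfl h0
            (fun k v hkv => Or.inl hkv)).1
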